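-- pv_equiv track=rewrite | github.com/CelsoHacker/NeuroROM-AI | core/plausibility.py | _has_long_ascii_run
-- ===== SOURCE A (Python) =====
-- def _has_long_ascii_run(text: str, min_run: int = 10) -> bool:
--     """Detecta sequência ASCII crescente longa (assinatura típica de tabela)."""
--     if not text or len(text) < min_run:
--         return False
--     run = 1
--     prev = ord(text[0])
--     for ch in text[1:]:
--         cur = ord(ch)
--         if cur == prev + 1:
--             run += 1
--             if run >= min_run:
--                 return True
--         else:
--             run = 1
--         prev = cur
--     return False
-- ===== SOURCE B (Python) =====
-- from itertools import groupby
--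
-- def _has_long_ascii_run(text: str, min_run: int = 10) -> bool:
--     diffs = [ord(b) - ord(a) == 1 for a, b in zip(text, text[1:])]
--     need = max(min_run - 1, 1)
--     return any(k and sum(1 for _ in g) >= need for k, g in groupby(diffs))
-- ===== Notes on version B (the rewrite author's own statement) =====
-- stated objective: idiomatic
-- what changed: A's stateful counter loop with early return and an explicit length guard is replaced by building the list of adjacent ASCII diffs and asking itertools.groupby whether any maximal group of +1 diffs has length >= max(min_run-1, 1), which makes the length guard implicit.
import Mathlib
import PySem

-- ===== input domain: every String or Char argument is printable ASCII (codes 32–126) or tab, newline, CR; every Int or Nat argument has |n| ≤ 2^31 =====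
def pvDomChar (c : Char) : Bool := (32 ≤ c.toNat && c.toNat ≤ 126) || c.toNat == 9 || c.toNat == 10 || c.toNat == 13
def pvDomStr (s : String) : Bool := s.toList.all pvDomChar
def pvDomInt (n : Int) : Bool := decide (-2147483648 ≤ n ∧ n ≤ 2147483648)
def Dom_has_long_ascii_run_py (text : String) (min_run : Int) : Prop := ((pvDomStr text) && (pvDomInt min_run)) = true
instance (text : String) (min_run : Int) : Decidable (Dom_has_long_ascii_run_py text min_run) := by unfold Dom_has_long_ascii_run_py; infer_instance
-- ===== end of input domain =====

-- B replaces A's early-return counter loop by an adjacent-diff list grouped with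
-- itertools.groupby (longest streak of +1 diffs vs threshold max(min_run-1,1));
-- objective: idiomatic, not faster.

-- ===== PORT A =====
-- the 'for ch in text[1:]' loop with early return; state = (run, prev)
def aLoop (m : Int) : List Char → Int → Int → Bool
  | [], _run, _prev => false
  | ch :: rest, run, prev =>
    let cur : Int := (ch.toNat : Int)
    if cur = prev + 1 then
      if run + 1 ≥ m then true
      else aLoop m rest (run + 1) cur
    else aLoop m rest 1 cur

def has_long_ascii_run_py (text : String) (min_run : Int) : Bool :=
  match text.toList with
  | [] => false
  | c :: rest =>
    if (text.toList.length : Int) < min_run then false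
    else aLoop min_run rest 1 ((c.toNat : Int))

-- ===== PORT B =====
-- hand port of itertools.groupby reduced to (key, group length) pairs
def groupLens : List Bool → List (Bool × Nat)
  | [] => []
  | x :: xs =>
    match groupLens xs with
    | [] => [(x, 1)]
    | (y, n) :: gs => if x = y then (y, n + 1) :: gs else (x, 1) :: (y, n) :: gs

def has_long_ascii_run_py_alt (text : String) (min_run : Int) : Bool :=
  let l := text.toList
  let diffs := List.zipWith (fun a b => decide ((b.toNat : Int) - (a.toNat : Int) = 1)) l l.tail
  let need : Int := max (min_run - 1) 1
  (groupLens diffs).any (fun p => p.1 && decide ((p.2 : Int) ≥ need))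

-- ===== PRECONDITION & SPEC =====
def Spec_has_long_ascii_run_py (text : String) (min_run : Int) (out : Bool) : Prop := out = has_long_ascii_run_py_alt text min_run
instance (text : String) (min_run : Int) (out : Bool) : Decidable (Spec_has_long_ascii_run_py text min_run out) := by unfold Spec_has_long_ascii_run_py; infer_instance

-- ===== CLAIM (what is proved, stated in full; the proofs are below) =====
def Claim_equal_has_long_ascii_run_py : Prop := ∀ (text : String) (min_run : Int), Dom_has_long_ascii_run_py text min_run → Spec_has_long_ascii_run_py text min_run (has_long_ascii_run_py text min_run)

-- ===== LEMMAS AND PROOFS =====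

-- reference: streak counter over the diff list
def sLoop (need : Int) : List Bool → Int → Bool
  | [], _ => false
  | d :: ds, s => if d then (if s + 1 ≥ need then true else sLoop need ds (s + 1)) else sLoop need ds 0

def pvDiffs (l : List Char) : List Bool :=
  List.zipWith (fun a b => decide ((b.toNat : Int) - (a.toNat : Int) = 1)) l l.tail

lemma aLoop_eq_sLoop (m : Int) :
    ∀ (rest : List Char) (c : Char) (s : Int),
      aLoop m rest (s + 1) ((c.toNat : Int)) = sLoop (m - 1) (pvDiffs (c :: rest)) s := by
  intro rest
  induction rest with
  | nil => intro c s; simp [aLoop, sLoop, pvDiffs]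
  | cons ch rest ih =>
    intro c s
    have hcond : ((ch.toNat : Int) = (c.toNat : Int) + 1) ↔
        ((ch.toNat : Int) - (c.toNat : Int) = 1) := by omega
    by_cases h : ((ch.toNat : Int) = (c.toNat : Int) + 1)
    · have hd : decide ((ch.toNat : Int) - (c.toNat : Int) = 1) = true := by
        simp [← hcond, h]
      by_cases h2 : s + 1 + 1 ≥ m
      · have h3 : s + 1 ≥ m - 1 := by omega
        simp [aLoop, sLoop, pvDiffs, h, hd, h2, h3]
      · have h3 : ¬ (s + 1 ≥ m - 1) := by omega
        have := ih ch (s + 1)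
        simp [aLoop, sLoop, pvDiffs, h, hd, h2, h3] at this ⊢
        exact this
    · have hd : decide ((ch.toNat : Int) - (c.toNat : Int) = 1) = false := by
        simp [← hcond, h]
      have := ih ch 0
      simp [aLoop, sLoop, pvDiffs, h, hd] at this ⊢
      exact this

lemma sLoop_max_one (need : Int) :
    ∀ (ds : List Bool) (s : Int), 0 ≤ s → sLoop need ds s = sLoop (max need 1) ds s := by
  intro ds
  induction ds with
  | nil => intro s _; simp [sLoop]
  | cons d ds ih =>
    intro s hs
    by_cases hd : d = true
    · have hiff : (s + 1 ≥ need) ↔ (s + 1 ≥ max need 1) := by omega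
      by_cases h : s + 1 ≥ need
      · simp [sLoop, hd, h, hiff.mp h]
      · have h2 : ¬ (s + 1 ≥ max need 1) := fun hh => h (hiff.mpr hh)
        simp [sLoop, hd, h, h2]
        exact ih (s + 1) (by omega)
    · simp at hd
      simp [sLoop, hd]
      exact ih 0 (by omega)

-- the "boost" from a streak already in progress: only the leading true-group sees it
def headBoost (need : Int) (gs : List (Bool × Nat)) (s : Int) : Bool :=
  match gs with
  | (true, n) :: _ => decide (s + (n : Int) ≥ need)
  | _ => false

def anyHit (need : Int) (gs : List (Bool × Nat)) : Bool :=
  gs.any (fun p => p.1 && decide (((p.2 : Int)) ≥ need))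

lemma sLoop_eq_groups (need : Int) (hneed : 1 ≤ need) :
    ∀ (ds : List Bool) (s : Int), 0 ≤ s →
      sLoop need ds s = (headBoost need (groupLens ds) s || anyHit need (groupLens ds)) := by
  intro ds
  induction ds with
  | nil => intro s _; simp [sLoop, groupLens, headBoost, anyHit]
  | cons d ds ih =>
    intro s hs
    rcases hgl : groupLens ds with _ | ⟨⟨y, n⟩, gs⟩
    · -- ds has empty grouping, i.e. ds = []
      have hds : ds = [] := by
        cases ds with
        | nil => rfl
        | cons a as =>
          exfalso
          simp only [groupLens] at hgl
          rcases h : groupLens as with _ | ⟨⟨y, n⟩, gs⟩ <;> simp [h] at hgl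
          split at hgl <;> simp_all
      subst hds
      cases d with
      | false => simp [sLoop, groupLens, headBoost, anyHit]
      | true =>
        by_cases h : s + 1 ≥ need
        · simp [sLoop, groupLens, headBoost, anyHit, h]
        · have h2 : ¬ ((1 : Int) ≥ need) := by omega
          simp [sLoop, groupLens, headBoost, anyHit, h, h2]
    · have ihs := ih (s + 1) (by omega)
      have ih0 := ih 0 (by omega)
      rw [hgl] at ihs ih0
      cases d with
      | true =>
        cases y with
        | true =>
          have hg : groupLens (true :: ds) = (true, n + 1) :: gs := by
            simp [groupLens, hgl]
          by_cases h : s + 1 ≥ need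
          · have h' : s + ((n : Int) + 1) ≥ need := by omega
            simp [sLoop, hg, headBoost, h, h']
          · rw [show sLoop need (true :: ds) s = sLoop need ds (s + 1) by simp [sLoop, h],
              ihs, hg]
            simp only [headBoost, anyHit, List.any_cons, Bool.true_and]
            cases hG : gs.any (fun p => p.1 && decide (((p.2 : Int)) ≥ need)) with
            | true => simp [hG]
            | false =>
              simp only [hG, Bool.or_false]
              push_cast
              by_cases hA : s + ((n : Int) + 1) ≥ need
              · have hA' : s + 1 + (n : Int) ≥ need := by omega
                simp [hA, hA']
              · have h1 : ¬ (s + 1 + (n : Int) ≥ need) := by omega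
                have h2 : ¬ ((n : Int) ≥ need) := by omega
                have h3 : ¬ ((n : Int) + 1 ≥ need) := by omega
                simp [hA, h1, h2, h3]
        | false =>
          have hg : groupLens (true :: ds) = (true, 1) :: (false, n) :: gs := by
            simp [groupLens, hgl]
          by_cases h : s + 1 ≥ need
          · simp [sLoop, hg, headBoost, h]
          · rw [show sLoop need (true :: ds) s = sLoop need ds (s + 1) by simp [sLoop, h],
              ihs, hg]
            simp only [headBoost, anyHit, List.any_cons, Bool.true_and, Bool.false_and,
              Bool.false_or]
            have hno1 : decide (((1 : Nat) : Int) ≥ need) = false := by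
              simp; omega
            have hnos : decide (s + (1 : Int) ≥ need) = false := by
              simp; omega
            simp [hno1, hnos]
            intro hle
            exact absurd hle (by omega)
      | false =>
        cases y with
        | true =>
          have hg : groupLens (false :: ds) = (false, 1) :: (true, n) :: gs := by
            simp [groupLens, hgl]
          rw [show sLoop need (false :: ds) s = sLoop need ds 0 by simp [sLoop], ih0, hg]
          simp only [headBoost, anyHit, List.any_cons, Bool.true_and, Bool.false_and,
            Bool.false_or]
          by_cases hB : ((n : Int) ≥ need)
          · have : (0 : Int) + (n : Int) ≥ need := by omega
            simp [hB, this]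
          · have : ¬ ((0 : Int) + (n : Int) ≥ need) := by omega
            simp [hB, this]
        | false =>
          have hg : groupLens (false :: ds) = (false, n + 1) :: gs := by
            simp [groupLens, hgl]
          rw [show sLoop need (false :: ds) s = sLoop need ds 0 by simp [sLoop], ih0, hg]
          simp [headBoost, anyHit]

lemma sLoop_zero (need : Int) (hneed : 1 ≤ need) (ds : List Bool) :
    sLoop need ds 0 = anyHit need (groupLens ds) := by
  rw [sLoop_eq_groups need hneed ds 0 (le_refl 0)]
  rcases hgl : groupLens ds with _ | ⟨⟨y, n⟩, gs⟩
  · simp [headBoost]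
  · cases y with
    | true => simp [headBoost, anyHit]
    | false => simp [headBoost]

lemma groupLens_len_le : ∀ (ds : List Bool) (p : Bool × Nat), p ∈ groupLens ds → p.2 ≤ ds.length := by
  intro ds
  induction ds with
  | nil => intro p hp; simp [groupLens] at hp
  | cons x xs ih =>
    intro p hp
    simp only [groupLens] at hp
    rcases hgl : groupLens xs with _ | ⟨⟨y, n⟩, gs⟩
    · rw [hgl] at hp
      simp at hp
      simp [hp]
    · rw [hgl] at hp
      have hp' : p ∈ (if x = y then (y, n + 1) :: gs else (x, 1) :: (y, n) :: gs) := hp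
      by_cases hxy : x = y
      · rw [if_pos hxy] at hp'
        rcases List.mem_cons.mp hp' with h | h
        · have h2 : n ≤ xs.length := ih (y, n) (by rw [hgl]; exact List.mem_cons_self ..)
          subst h
          show n + 1 ≤ (x :: xs).length
          simp only [List.length_cons]
          omega
        · have h2 : p.2 ≤ xs.length := ih p (by rw [hgl]; exact List.mem_cons_of_mem _ h)
          simp only [List.length_cons]
          omega
      · rw [if_neg hxy] at hp'
        rcases List.mem_cons.mp hp' with h | h
        · subst h; simp
        · have h2 : p.2 ≤ xs.length := ih p (by rw [hgl]; exact h)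
          simp only [List.length_cons]
          omega

-- ===== VERDICT (by name: the statement is the Claim_ definition above) =====
theorem has_long_ascii_run_py_spec : Claim_equal_has_long_ascii_run_py := by
  intro text min_run _
  unfold Spec_has_long_ascii_run_py has_long_ascii_run_py has_long_ascii_run_py_alt
  rcases hl : text.toList with _ | ⟨c, rest⟩
  · simp [groupLens, pvDiffs]
  · simp only []
    by_cases hguard : (((c :: rest).length : Int) < min_run)
    · rw [if_pos hguard]
      simp only [List.length_cons] at hguard
      -- min_run > len ≥ 1, so need = min_run - 1 and every group is shorter
      have hm : (2 : Int) ≤ min_run := by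
        have : (0 : Int) ≤ (rest.length : Int) := by positivity
        omega
      have hneed : max (min_run - 1) 1 = min_run - 1 := by omega
      symm
      rw [List.any_eq_false]
      intro p hp
      have hlen : p.2 ≤ (List.zipWith (fun a b => decide ((b.toNat : Int) - (a.toNat : Int) = 1))
          (c :: rest) (c :: rest).tail).length := groupLens_len_le _ p hp
      simp only [List.tail_cons, List.length_zipWith, List.length_cons] at hlen
      have hlen2 : p.2 ≤ rest.length := by omega
      have : ¬ ((p.2 : Int) ≥ max (min_run - 1) 1) := by
        rw [hneed]
        have : ((p.2 : Int)) ≤ (rest.length : Int) := by exact_mod_cast hlen2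
        omega
      simp [this]
    · rw [if_neg hguard]
      have h1 : aLoop min_run rest 1 ((c.toNat : Int)) =
          sLoop (min_run - 1) (pvDiffs (c :: rest)) 0 := by
        have := aLoop_eq_sLoop min_run rest c 0
        simpa using this
      have h2 : sLoop (min_run - 1) (pvDiffs (c :: rest)) 0 =
          sLoop (max (min_run - 1) 1) (pvDiffs (c :: rest)) 0 :=
        sLoop_max_one (min_run - 1) _ 0 (le_refl 0)
      have h3 : sLoop (max (min_run - 1) 1) (pvDiffs (c :: rest)) 0 =
          anyHit (max (min_run - 1) 1) (groupLens (pvDiffs (c :: rest))) :=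
        sLoop_zero _ (le_max_right _ _) _
      rw [h1, h2, h3]
      simp [anyHit, pvDiffs]
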